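-- pv_equiv track=rewrite | github.com/kmsherbertvt/publiccopy-bp-mitigation-code | old_python/simulator.py | _make_complete_pool
-- ===== SOURCE A (Python) =====
-- _THREE_QUBIT_COMPLETE_POOL = ['ZZY', 'ZYI', 'YII', 'IYI']
--
-- def _make_complete_pool(n_qubits: int):
--     """Construct a complete pool on `n` qubits with `2n-2` elements.
--     Parameters
--     ----------
--     n_qubits : int
--         Number of qubits.
--     Returns
--     -------
--     List[str]
--         Pauli strings for elements in pool.
--     """
--     if n_qubits == 3:
--         result = _THREE_QUBIT_COMPLETE_POOL
--     elif n_qubits > 3: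
--         _lower_pool = _make_complete_pool(n_qubits-1)
--         result = ['Z'+pauli for pauli in _lower_pool]
--
--         Yn = 'Y' + 'I'*(n_qubits-1)
--         Ynm1 = 'IY' + 'I'*(n_qubits-2)
--
--         result.extend([Yn, Ynm1])
--     else:
--         raise ValueError('Invalid number of qubits: {}'.format(n_qubits))
--
--     return result
-- ===== SOURCE B (Python) =====
-- _THREE_QUBIT_COMPLETE_POOL = ['ZZY', 'ZYI', 'YII', 'IYI']
--
-- def _make_complete_pool(n_qubits: int):
--     """Iterative single-pass construction: each pool string is built directly
--     from its Z-prefix and one of two fixed Y-patterns, no recursion."""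
--     if n_qubits < 3:
--         raise ValueError('Invalid number of qubits: {}'.format(n_qubits))
--     z = 'Z' * (n_qubits - 3)
--     result = [z + p for p in _THREE_QUBIT_COMPLETE_POOL]
--     for k in range(4, n_qubits + 1):
--         zpre = 'Z' * (n_qubits - k)
--         result.append(zpre + 'Y' + 'I' * (k - 1))
--         result.append(zpre + 'IY' + 'I' * (k - 2))
--     return result
-- ===== Notes on version B (the rewrite author's own statement) =====
-- stated objective: faster
-- what changed: Replaced A's recursion (which at every level re-copies and re-prefixes all strings of the lower pool) by a single loop that builds each pool string directly from its 'Z'*(n-k) prefix and one of two fixed Y-patterns.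
import Mathlib
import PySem

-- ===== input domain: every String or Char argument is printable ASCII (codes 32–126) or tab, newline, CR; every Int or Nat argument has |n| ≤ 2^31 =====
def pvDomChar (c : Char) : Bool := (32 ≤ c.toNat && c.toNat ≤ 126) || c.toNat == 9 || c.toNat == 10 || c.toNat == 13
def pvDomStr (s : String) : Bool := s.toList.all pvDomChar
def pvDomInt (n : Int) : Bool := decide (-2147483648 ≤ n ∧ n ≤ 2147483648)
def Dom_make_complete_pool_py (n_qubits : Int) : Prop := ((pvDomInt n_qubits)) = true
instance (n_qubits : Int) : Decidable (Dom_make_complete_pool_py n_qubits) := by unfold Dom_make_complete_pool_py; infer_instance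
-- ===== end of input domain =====

-- B replaces A's O(n^3) recursion (each level re-copies and re-prefixes every lower string)
-- by a single pass that builds each string directly from its Z-prefix and one of two fixed
-- Y-patterns: objective 'faster' (asymptotic).

-- ===== PORT A =====
-- 'I'*(k) for Int k is ported as String.ofList (List.replicate k.toNat 'I'):
-- exact, since Python's str*int gives '' for k ≤ 0, as .toNat does.
def make_complete_pool_py (n_qubits : Int) : List String :=
  if n_qubits = 3 then ["ZZY", "ZYI", "YII", "IYI"]
  else if 3 < n_qubits then
    let lower := make_complete_pool_py (n_qubits - 1)
    let result := lower.map (fun pauli => "Z" ++ pauli)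
    let yn := "Y" ++ String.ofList (List.replicate (n_qubits - 1).toNat 'I')
    let ynm1 := "IY" ++ String.ofList (List.replicate (n_qubits - 2).toNat 'I')
    result ++ [yn, ynm1]
  else []  -- Python raises ValueError here; excluded by Pre_
termination_by n_qubits.toNat
decreasing_by omega

-- ===== PORT B =====
def make_complete_pool_py_alt (n_qubits : Int) : List String :=
  if n_qubits < 3 then []  -- Python B raises ValueError here; excluded by Pre_
  else
    let z := String.ofList (List.replicate (n_qubits - 3).toNat 'Z')
    let base := ["ZZY", "ZYI", "YII", "IYI"].map (fun p => z ++ p)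
    (PySem.List.pyRange 4 (n_qubits + 1) 1).foldl
      (fun acc k =>
        let zpre := String.ofList (List.replicate (n_qubits - k).toNat 'Z')
        (acc ++ [zpre ++ "Y" ++ String.ofList (List.replicate (k - 1).toNat 'I')])
          ++ [zpre ++ "IY" ++ String.ofList (List.replicate (k - 2).toNat 'I')])
      base

-- ===== PRECONDITION & SPEC =====
-- Pre_ excludes exactly n_qubits < 3, where A raises ValueError.
def Pre_make_complete_pool_py (n_qubits : Int) : Prop := 3 ≤ n_qubits
instance (n_qubits : Int) : Decidable (Pre_make_complete_pool_py n_qubits) := by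
  unfold Pre_make_complete_pool_py; infer_instance
def pvWitness_make_complete_pool_py : Int := 3

def Spec_make_complete_pool_py (n_qubits : Int) (out : List String) : Prop :=
  out = make_complete_pool_py_alt n_qubits
instance (n_qubits : Int) (out : List String) : Decidable (Spec_make_complete_pool_py n_qubits out) := by
  unfold Spec_make_complete_pool_py; infer_instance

-- ===== CLAIM (what is proved, stated in full; the proofs are below) =====
def Claim_equal_make_complete_pool_py : Prop :=
  ∀ (n_qubits : Int), Dom_make_complete_pool_py n_qubits →
    Pre_make_complete_pool_py n_qubits →
    Spec_make_complete_pool_py n_qubits (make_complete_pool_py n_qubits)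

-- ===== LEMMAS AND PROOFS =====

-- the per-level pair of strings B appends for level k (proof-only closed form)
def pvPair (n k : Int) : List String :=
  [ String.ofList (List.replicate (n - k).toNat 'Z') ++ "Y" ++ String.ofList (List.replicate (k - 1).toNat 'I'),
    String.ofList (List.replicate (n - k).toNat 'Z') ++ "IY" ++ String.ofList (List.replicate (k - 2).toNat 'I') ]

def pvCform (n : Int) : List String :=
  (["ZZY", "ZYI", "YII", "IYI"].map (fun p => String.ofList (List.replicate (n - 3).toNat 'Z') ++ p))
    ++ (PySem.List.pyRange 4 (n + 1) 1).flatMap (pvPair n)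

theorem pvB_eq_cform (n : Int) (h : 3 ≤ n) : make_complete_pool_py_alt n = pvCform n := by
  unfold make_complete_pool_py_alt pvCform
  rw [if_neg (by omega)]
  have hbody : (fun (acc : List String) (k : Int) =>
      let zpre := String.ofList (List.replicate (n - k).toNat 'Z')
      (acc ++ [zpre ++ "Y" ++ String.ofList (List.replicate (k - 1).toNat 'I')])
        ++ [zpre ++ "IY" ++ String.ofList (List.replicate (k - 2).toNat 'I')])
      = fun acc k => acc ++ pvPair n k := by
    funext acc k; simp [pvPair]
  rw [hbody, PySem.List.foldl_append_eq_flatMap]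

theorem pvZ_step (j : Nat) (s : String) :
    "Z" ++ (String.ofList (List.replicate j 'Z') ++ s)
      = String.ofList (List.replicate (j + 1) 'Z') ++ s := by
  apply String.toList_injective
  simp [List.replicate_succ]

theorem pvZ_step2 (j : Nat) (s t : String) :
    "Z" ++ (String.ofList (List.replicate j 'Z') ++ s ++ t)
      = String.ofList (List.replicate (j + 1) 'Z') ++ s ++ t := by
  apply String.toList_injective
  simp [List.replicate_succ]

theorem pvEmpty_pre (s : String) : String.ofList (List.replicate 0 'Z') ++ s = s := by
  apply String.toList_injective
  simp

theorem pvA_eq_cform (m : Nat) : make_complete_pool_py (3 + (m : Int)) = pvCform (3 + (m : Int)) := by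
  induction m with
  | zero =>
      rw [make_complete_pool_py]
      rw [if_pos (by norm_num)]
      unfold pvCform
      rw [PySem.List.pyRange_one_eq_nil (by norm_num)]
      simp
  | succ m ih =>
      have hn : (3 : Int) + ((m : Int) + 1) - 1 = 3 + (m : Int) := by ring
      rw [make_complete_pool_py]
      rw [if_neg (by omega), if_pos (by omega)]
      push_cast
      rw [hn, ih]
      unfold pvCform
      have hsplit : PySem.List.pyRange 4 (3 + ((m : Int) + 1) + 1) 1
          = PySem.List.pyRange 4 (3 + (m : Int) + 1) 1 ++ [3 + (m : Int) + 1] := by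
        have : (3 : Int) + ((m : Int) + 1) + 1 = (3 + (m : Int) + 1) + 1 := by ring
        rw [this, PySem.List.pyRange_one_succ_right (by omega)]
      rw [hsplit]
      simp only [List.map_append, List.map_map, List.flatMap_append, List.flatMap_cons,
        List.flatMap_nil, List.append_nil, List.append_assoc]
      congr 1
      · -- base strings gain one Z
        apply List.map_congr_left
        intro p _
        have h3 : ((3:Int) + (m:Int) - 3).toNat = m := by omega
        have h4 : ((3:Int) + ((m:Int)+1) - 3).toNat = m + 1 := by omega
        simp only [Function.comp, h3, h4]
        exact pvZ_step m p
      · congr 1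
        · -- each lower-level pair gains one Z
          rw [List.map_flatMap]
          apply List.flatMap_congr
          intro k hk
          have hk' := (PySem.List.mem_pyRange_one.mp hk)
          have h1 : ((3:Int) + (m:Int) - k).toNat + 1 = ((3:Int) + ((m:Int)+1) - k).toNat := by omega
          unfold pvPair
          simp only [List.map_cons, List.map_nil]
          rw [← h1, pvZ_step2, pvZ_step2]
        · -- the two new top-level strings
          unfold pvPair
          have h0 : ((3:Int) + ((m:Int) + 1) - (3 + (m:Int) + 1)).toNat = 0 := by omega
          have hy : ((3:Int) + (m:Int)).toNat = ((3:Int) + (m:Int) + 1 - 1).toNat := by omega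
          have hy2 : ((3:Int) + ((m:Int) + 1) - 2).toNat = ((3:Int) + (m:Int) + 1 - 2).toNat := by omega
          simp only [h0, hy, hy2]
          rw [pvEmpty_pre, pvEmpty_pre]

-- ===== VERDICT (by name: the statement is the Claim_ definition above) =====
theorem make_complete_pool_py_spec : Claim_equal_make_complete_pool_py := by
  intro n _ hpre
  unfold Spec_make_complete_pool_py
  have h3 : (3:Int) ≤ n := hpre
  obtain ⟨m, rfl⟩ : ∃ m : Nat, n = 3 + (m : Int) := ⟨(n - 3).toNat, by omega⟩
  rw [pvA_eq_cform, pvB_eq_cform (3 + (m : Int)) (by omega)]
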